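-- pv_equiv track=rewrite | github.com/ArielMarchini/python-course-2 | python-course-2/main-projects/unit-5/ex-5.4.py | check_id_valid
-- ===== SOURCE A (Python) =====
-- def check_id_valid(id_number):
--     """
--     Check if an ID number is valid.
--
--     Args:
--         id_number (int): The ID number to be checked.
--
--     Returns:
--         bool: True if the ID number is valid, False otherwise.
--     """
--     sum = 0
--     even = False
--     if len(str(id_number)) != 9:
--         return False
--     for digit in str(id_number):
--         digit = int(digit)
--         if even:
--             sum += ((digit * 2) // 10) + ((digit * 2) % 10)
--         else:
--             sum += digit
--         even = (not even)
--     return sum % 10 == 0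
-- ===== SOURCE B (Python) =====
-- def check_id_valid(id_number):
--     s = str(id_number)
--     if len(s) != 9:
--         return False
--     return pair_total(s) % 10 == 0
--
--
-- def pair_total(t):
--     """Checksum of a digit string processed two characters at a time:
--     the first of each pair is added as-is, the second is doubled and
--     digit-reduced."""
--     if not t:
--         return 0
--     if len(t) == 1:
--         return int(t[0])
--     d2 = int(t[1]) * 2
--     return int(t[0]) + d2 // 10 + d2 % 10 + pair_total(t[2:])
-- ===== Notes on version B (the rewrite author's own statement) =====
-- stated objective: alternative
-- what changed: Replaces A's single loop with a toggled parity flag by a flagless helper that recurses over the digit string two characters at a time (plain digit + doubled-and-digit-reduced digit per step).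
import Mathlib
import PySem

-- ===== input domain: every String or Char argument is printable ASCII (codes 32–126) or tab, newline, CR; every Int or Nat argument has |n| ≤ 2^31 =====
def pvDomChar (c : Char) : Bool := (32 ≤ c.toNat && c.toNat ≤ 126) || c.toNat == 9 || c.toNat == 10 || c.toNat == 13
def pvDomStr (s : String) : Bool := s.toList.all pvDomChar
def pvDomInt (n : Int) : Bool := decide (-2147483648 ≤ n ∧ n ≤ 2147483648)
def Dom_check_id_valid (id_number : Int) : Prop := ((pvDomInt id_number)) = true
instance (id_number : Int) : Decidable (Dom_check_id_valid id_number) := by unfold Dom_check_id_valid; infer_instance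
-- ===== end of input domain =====

-- B replaces A's parity-flag loop by a helper that consumes the digit string two
-- characters at a time (pair recursion, no flag); same checksum, objective: alternative decomposition.

-- ===== PORT A =====
-- the for-loop over str(id_number) with state (sum, even); Option: none = int(digit) raised ValueError
def pvALoop : List Char → Int → Bool → Option Int
  | [], s, _ => some s
  | c :: rest, s, even =>
    match PySem.Int.ofChars? [c] with
    | none => none
    | some d =>
      pvALoop rest
        (if even then s + (PySem.Int.floordiv (d * 2) 10 + PySem.Int.mod (d * 2) 10) else s + d)
        (!even)

def check_id_valid (id_number : Int) : Bool :=
  let cs := PySem.Int.toChars id_number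
  if cs.length ≠ 9 then false
  else
    match pvALoop cs 0 false with
    | some s => PySem.Int.mod s 10 == 0
    | none => false   -- int(digit) raised ValueError: these inputs are excluded by Pre_

-- ===== PORT B =====
-- pair_total: two characters per step, no parity flag; none = int() raised (outside Pre_)
def pvPairTotal : List Char → Option Int
  | [] => some 0
  | [c] => PySem.Int.ofChars? [c]
  | c1 :: c2 :: rest =>
    match PySem.Int.ofChars? [c2], PySem.Int.ofChars? [c1], pvPairTotal rest with
    | some b, some a, some r =>
      some (a + PySem.Int.floordiv (b * 2) 10 + PySem.Int.mod (b * 2) 10 + r)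
    | _, _, _ => none

def check_id_valid_alt (id_number : Int) : Bool :=
  let cs := PySem.Int.toChars id_number
  if cs.length ≠ 9 then false
  else
    match pvPairTotal cs with
    | some t => PySem.Int.mod t 10 == 0
    | none => false   -- int() raised: excluded by Pre_

-- ===== PRECONDITION & SPEC =====
-- Pre_ excludes exactly the ids where str(id_number) has 9 characters including the '-' sign
-- (-99999999 ≤ id ≤ -10000000), on which A (and B) raise ValueError from int('-').
def Pre_check_id_valid (id_number : Int) : Prop :=
  id_number < -99999999 ∨ -10000000 < id_number
instance (id_number : Int) : Decidable (Pre_check_id_valid id_number) := by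
  unfold Pre_check_id_valid; infer_instance

def pvWitness_check_id_valid : Int := 123456782

def Spec_check_id_valid (id_number : Int) (out : Bool) : Prop := out = check_id_valid_alt id_number
instance (id_number : Int) (out : Bool) : Decidable (Spec_check_id_valid id_number out) := by unfold Spec_check_id_valid; infer_instance

-- ===== CLAIM (what is proved, stated in full; the proofs are below) =====
def Claim_equal_check_id_valid : Prop := ∀ (id_number : Int), Dom_check_id_valid id_number → Pre_check_id_valid id_number → Spec_check_id_valid id_number (check_id_valid id_number)

-- ===== LEMMAS AND PROOFS =====

-- A's parity-toggled loop started on `even = false` equals B's pair recursion shifted by the accumulator.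
theorem pvALoop_eq_pairTotal (cs : List Char) :
    ∀ s : Int, pvALoop cs s false = (pvPairTotal cs).map (fun t => s + t) := by
  induction cs using pvPairTotal.induct with
  | case1 =>
      intro s; simp [pvALoop, pvPairTotal]
  | case2 c =>
      intro s
      simp only [pvALoop, pvPairTotal]
      cases PySem.Int.ofChars? [c] <;> simp
  | case3 c1 c2 rest b a r hr ha hb ih =>
      intro s
      simp [pvALoop, pvPairTotal, ha, hb, ih, hr]
      ring
  | case4 c1 c2 rest h ih =>
      intro s
      simp only [pvALoop, pvPairTotal]
      cases hc1 : PySem.Int.ofChars? [c1] <;> cases hc2 : PySem.Int.ofChars? [c2] <;>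
        simp
      cases hr : pvPairTotal rest with
      | none => rw [ih]; simp [hr]
      | some r => exact (h _ _ _ hc2 hc1 hr).elim

theorem check_id_valid_spec : Claim_equal_check_id_valid := by
  intro id _ _
  unfold Spec_check_id_valid check_id_valid check_id_valid_alt
  by_cases h : (PySem.Int.toChars id).length ≠ 9
  · simp [h]
  · simp only [h, if_false]
    rw [pvALoop_eq_pairTotal]
    cases pvPairTotal (PySem.Int.toChars id) <;> simp
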